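-- pv_equiv track=rewrite | github.com/kdhageman/pylicenseheader | license.py | remove_header
-- ===== SOURCE A (Python) =====
-- def remove_header(prefix, lines):
--     """
--     Remove license header from content. Assumes that all lines (at the start of a files) that start with '//' are part of the license header
--     :param lines: content as array of strings (representing lines of the file)
--     :return: lines without header
--     """
--     is_header = True
--     reslines = []
--     for line in lines:
--         if is_header:
--             if not (line.startswith(prefix) or line.strip() == ""):
--                 is_header = False
--                 reslines += [line]
--                 continue
--         else:
--             reslines += [line]
--     return reslines
-- ===== SOURCE B (Python) =====
-- def remove_header(prefix, lines):
--     for i, line in enumerate(lines):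
--         if not (line.startswith(prefix) or line.strip() == ""):
--             return lines[i:]
--     return []
-- ===== Notes on version B (the rewrite author's own statement) =====
-- stated objective: simpler
-- what changed: Replaces the stateful is_header flag and per-line list accumulation with finding the first non-header line via enumerate and returning a single tail slice.
import Mathlib
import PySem

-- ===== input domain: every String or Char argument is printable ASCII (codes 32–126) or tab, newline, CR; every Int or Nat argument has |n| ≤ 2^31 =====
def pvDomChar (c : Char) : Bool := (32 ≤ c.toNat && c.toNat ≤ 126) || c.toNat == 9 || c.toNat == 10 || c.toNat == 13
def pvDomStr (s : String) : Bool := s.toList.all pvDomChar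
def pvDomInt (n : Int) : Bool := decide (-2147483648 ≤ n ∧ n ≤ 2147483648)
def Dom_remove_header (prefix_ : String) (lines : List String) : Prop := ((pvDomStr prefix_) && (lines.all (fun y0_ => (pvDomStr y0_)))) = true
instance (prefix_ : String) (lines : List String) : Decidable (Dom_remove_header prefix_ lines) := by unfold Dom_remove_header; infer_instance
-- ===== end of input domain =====

-- B replaces A's stateful is_header flag and per-line accumulation with a search for the
-- first non-header line followed by one tail slice (simpler decomposition of the same O(n) scan).


-- ===== PORT A =====
-- Port of A: foldl over lines with state (is_header, reslines), matching the flag loop.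
def remove_header (prefix_ : String) (lines : List String) : List String :=
  (lines.foldl (fun (st : Bool × List String) line =>
      if st.1 then
        if !(PySem.Str.startswith line prefix_ || PySem.Str.strip line == "") then
          (false, st.2 ++ [line])
        else st
      else (st.1, st.2 ++ [line])) (true, [])).2

-- ===== PORT B =====
-- Port of B: recurse to the first non-header line and return the tail from there.
def removeHeaderAltGo (prefix_ : String) : List String → List String
  | [] => []
  | l :: ls =>
    if !(PySem.Str.startswith l prefix_ || PySem.Str.strip l == "") then l :: ls
    else removeHeaderAltGo prefix_ ls

def remove_header_alt (prefix_ : String) (lines : List String) : List String :=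
  removeHeaderAltGo prefix_ lines

-- ===== PRECONDITION & SPEC =====
def Spec_remove_header (prefix_ : String) (lines : List String) (out : List String) : Prop := out = remove_header_alt prefix_ lines
instance (prefix_ : String) (lines : List String) (out : List String) : Decidable (Spec_remove_header prefix_ lines out) := by unfold Spec_remove_header; infer_instance

-- ===== CLAIM (what is proved, stated in full; the proofs are below) =====
def Claim_equal_remove_header : Prop := ∀ (prefix_ : String) (lines : List String), Dom_remove_header prefix_ lines → Spec_remove_header prefix_ lines (remove_header prefix_ lines)

-- ===== LEMMAS AND PROOFS =====
-- Loop invariant for A's fold: from header state (true, acc) it yields acc ++ B's tail;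
-- from non-header state (false, acc) it copies the rest verbatim.
theorem removeHeader_fold_false (prefix_ : String) (ls : List String) (acc : List String) :
    (ls.foldl (fun (st : Bool × List String) line =>
      if st.1 then
        if !(PySem.Str.startswith line prefix_ || PySem.Str.strip line == "") then
          (false, st.2 ++ [line])
        else st
      else (st.1, st.2 ++ [line])) (false, acc)) = (false, acc ++ ls) := by
  induction ls generalizing acc with
  | nil => simp
  | cons l ls ih =>
    rw [List.foldl_cons, if_neg (by simp), ih]
    simp

theorem removeHeader_fold_true (prefix_ : String) (ls : List String) (acc : List String) :
    (ls.foldl (fun (st : Bool × List String) line =>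
      if st.1 then
        if !(PySem.Str.startswith line prefix_ || PySem.Str.strip line == "") then
          (false, st.2 ++ [line])
        else st
      else (st.1, st.2 ++ [line])) (true, acc)).2 = acc ++ removeHeaderAltGo prefix_ ls := by
  induction ls generalizing acc with
  | nil => simp [removeHeaderAltGo]
  | cons l ls ih =>
    by_cases h : (PySem.Str.startswith l prefix_ || PySem.Str.strip l == "") = true
    · rw [List.foldl_cons, removeHeaderAltGo, if_pos rfl,
        if_neg (by simp at h ⊢; intro hf; exact h.resolve_left (by simp [hf])), if_neg (by simp at h ⊢; intro hf; exact h.resolve_left (by simp [hf]))]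
      exact ih acc
    · rw [List.foldl_cons, removeHeaderAltGo, if_pos rfl,
        if_pos (by simp_all), if_pos (by simp_all),
        removeHeader_fold_false]
      simp

-- ===== VERDICT (by name: the statement is the Claim_ definition above) =====
theorem remove_header_spec : Claim_equal_remove_header := by
  intro prefix_ lines _
  unfold Spec_remove_header remove_header remove_header_alt
  simpa using removeHeader_fold_true prefix_ lines []
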